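-- pv_equiv track=rewrite | github.com/jhacksman/spark-vtuber | src/spark_vtuber/tts/break_finder.py | _extend_to_natural_break
-- ===== SOURCE A (Python) =====
-- def _extend_to_natural_break(text: str, start_pos: int) -> int:
--     """Extend position to next natural break point."""
--     # Look for punctuation or comma within reasonable distance
--     search_text = text[start_pos : start_pos + 50]
--
--     # Find nearest break
--     for i, char in enumerate(search_text):
--         if char in ".!?,;:":
--             return start_pos + i + 1
--
--     # No punctuation found, find word boundary
--     space_pos = search_text.find(" ")
--     if space_pos > 0:
--         return start_pos + space_pos
--
--     return start_pos
-- ===== SOURCE B (Python) =====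
-- def _extend_to_natural_break(text: str, start_pos: int) -> int:
--     """Single combined pass over the <=50-char window: punctuation wins outright;
--     otherwise the first space index (if > 0) is used; else start_pos."""
--     first_space = -1
--     for i, ch in enumerate(text[start_pos : start_pos + 50]):
--         if ch in ".!?,;:":
--             return start_pos + i + 1
--         if ch == " " and first_space < 0:
--             first_space = i
--     if first_space > 0:
--         return start_pos + first_space
--     return start_pos
-- ===== Notes on version B (the rewrite author's own statement) =====
-- stated objective: alternative
-- what changed: A scans the 50-char window once for punctuation and then runs a second separate find(' ') scan; B makes a single combined pass that returns immediately on punctuation and records the first space index as it goes.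
import Mathlib
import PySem

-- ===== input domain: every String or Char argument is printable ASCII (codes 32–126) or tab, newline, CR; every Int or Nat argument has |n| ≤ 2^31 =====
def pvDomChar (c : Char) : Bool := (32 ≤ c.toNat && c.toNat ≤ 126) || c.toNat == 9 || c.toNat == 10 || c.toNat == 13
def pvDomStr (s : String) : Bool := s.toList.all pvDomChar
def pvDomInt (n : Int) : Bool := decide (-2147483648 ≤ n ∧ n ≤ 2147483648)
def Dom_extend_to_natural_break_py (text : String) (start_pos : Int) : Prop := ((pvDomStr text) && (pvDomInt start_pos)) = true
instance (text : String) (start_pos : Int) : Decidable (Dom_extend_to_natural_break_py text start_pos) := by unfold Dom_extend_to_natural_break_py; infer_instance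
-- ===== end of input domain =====

-- B merges A's two sequential window scans (punctuation scan, then str.find for a space)
-- into one combined pass that records the first space while scanning; same return value.


-- ===== PORT A =====
-- char in ".!?,;:"
def pvIsBreak (c : Char) : Bool := PySem.Chars.isIn [c] ".!?,;:".toList

-- for i, char in enumerate(search_text): if char in ".!?,;:": return start_pos + i + 1
def pvALoop (s : Int) : List Char → Nat → Option Int
  | [], _ => none
  | c :: rest, i => if pvIsBreak c then some (s + (i : Int) + 1) else pvALoop s rest (i + 1)

def extend_to_natural_break_py (text : String) (start_pos : Int) : Int :=
  let search_text := PySem.List.slice text.toList (some start_pos) (some (start_pos + 50))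
  match pvALoop start_pos search_text 0 with
  | some r => r
  | none =>
      let space_pos := PySem.Chars.find search_text [' ']
      if space_pos > 0 then start_pos + space_pos else start_pos

-- ===== PORT B =====
-- one pass: return on punctuation, else remember the index of the FIRST space (fs = -1 while none seen)
def pvBLoop (s : Int) : List Char → Nat → Int → Int
  | [], _, fs => if fs > 0 then s + fs else s
  | c :: rest, i, fs =>
      if pvIsBreak c then s + (i : Int) + 1
      else pvBLoop s rest (i + 1) (if c = ' ' ∧ fs < 0 then (i : Int) else fs)

def extend_to_natural_break_py_alt (text : String) (start_pos : Int) : Int :=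
  pvBLoop start_pos (PySem.List.slice text.toList (some start_pos) (some (start_pos + 50))) 0 (-1)

-- ===== PRECONDITION & SPEC =====
def Spec_extend_to_natural_break_py (text : String) (start_pos : Int) (out : Int) : Prop := out = extend_to_natural_break_py_alt text start_pos
instance (text : String) (start_pos : Int) (out : Int) : Decidable (Spec_extend_to_natural_break_py text start_pos out) := by unfold Spec_extend_to_natural_break_py; infer_instance

-- ===== CLAIM (what is proved, stated in full; the proofs are below) =====
def Claim_equal_extend_to_natural_break_py : Prop := ∀ (text : String) (start_pos : Int), Dom_extend_to_natural_break_py text start_pos → Spec_extend_to_natural_break_py text start_pos (extend_to_natural_break_py text start_pos)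

-- ===== LEMMAS AND PROOFS =====
-- index of the first space of a list, as an Option (proof-side characterisation of str.find(" "))
def pvFirstSpace : List Char → Option Nat
  | [] => none
  | c :: l => if c = ' ' then some 0 else (pvFirstSpace l).map (· + 1)

lemma pvFirstSpace_none {l : List Char} (h : pvFirstSpace l = none) : ' ' ∉ l := by
  induction l with
  | nil => simp
  | cons c t ih =>
    by_cases hc : c = ' ' <;> simp [pvFirstSpace, hc] at h ⊢
    exact ⟨fun he => hc he.symm, ih h⟩

lemma pvFirstSpace_some {l : List Char} {k : Nat} (h : pvFirstSpace l = some k) :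
    [' '] <+: l.drop k ∧ ∀ j < k, ¬ [' '] <+: l.drop j := by
  induction l generalizing k with
  | nil => simp [pvFirstSpace] at h
  | cons c t ih =>
    by_cases hc : c = ' '
    · simp only [pvFirstSpace, hc, if_pos] at h
      obtain rfl : k = 0 := by simpa using h.symm
      subst hc
      exact ⟨by simp, by omega⟩
    · simp [pvFirstSpace, hc] at h
      obtain ⟨k', hk', rfl⟩ := h
      obtain ⟨h1, h2⟩ := ih hk'
      refine ⟨by simpa using h1, ?_⟩
      intro j hj
      cases j with
      | zero =>
        simp only [List.drop_zero]
        intro hp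
        rcases hp with ⟨t', ht'⟩
        exact hc (by injection ht' with h1' _; exact h1'.symm)
      | succ j' => simpa using h2 j' (by omega)

lemma find_space_eq (l : List Char) :
    PySem.Chars.find l [' '] = match pvFirstSpace l with | none => -1 | some k => (k : Int) := by
  cases h : pvFirstSpace l with
  | none =>
    show PySem.Chars.find l [' '] = -1
    rw [PySem.Chars.find_eq_neg_one_iff, List.singleton_infix_iff]
    exact pvFirstSpace_none h
  | some k =>
    show PySem.Chars.find l [' '] = (k : Int)
    obtain ⟨h1, h2⟩ := pvFirstSpace_some h
    have hmem : ' ' ∈ l := List.mem_of_mem_drop (h1.subset (by simp))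
    have hge : 0 ≤ PySem.Chars.find l [' '] := by
      rw [PySem.Chars.find_nonneg_iff, List.singleton_infix_iff]; exact hmem
    obtain ⟨hp, hmin⟩ := PySem.Chars.find_spec (s := l) (sub := [' ']) hge
    have hkf : ¬ k < (PySem.Chars.find l [' ']).toNat := fun hlt => hmin k hlt h1
    have hfk : ¬ (PySem.Chars.find l [' ']).toNat < k := fun hlt => h2 _ hlt hp
    omega

lemma bLoop_eq (s : Int) : ∀ (l : List Char) (i : Nat) (fs : Int),
    pvBLoop s l i fs =
      match pvALoop s l i with
      | some r => r
      | none =>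
          if (if fs < 0 then (match pvFirstSpace l with | none => -1 | some k => (i : Int) + k) else fs) > 0
          then s + (if fs < 0 then (match pvFirstSpace l with | none => -1 | some k => (i : Int) + k) else fs)
          else s := by
  intro l
  induction l with
  | nil =>
    intro i fs
    simp only [pvBLoop, pvALoop, pvFirstSpace]
    by_cases h : fs < 0
    · simp [h, show ¬ fs > 0 by linarith]
    · simp [h]
  | cons c rest ih =>
    intro i fs
    by_cases hb : pvIsBreak c
    · simp [pvBLoop, pvALoop, hb]
    · simp only [pvBLoop, pvALoop, hb, Bool.false_eq_true, if_false, ih]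
      cases hA : pvALoop s rest (i + 1) with
      | some r => simp
      | none =>
        simp only [pvFirstSpace]
        by_cases hc : c = ' '
        · by_cases hfs : fs < 0
          · have hi : ¬ ((i : Int) < 0) := not_lt.mpr (Int.natCast_nonneg i)
            simp only [hc, hfs, and_self, if_pos, hi, if_false, Nat.cast_zero, add_zero]
          · simp only [hc, hfs, and_false, if_false]
        · simp only [hc, false_and, if_false]
          cases hF : pvFirstSpace rest with
          | none => simp
          | some k =>
            by_cases hfs : fs < 0
            · simp only [hfs, if_true, Option.map_some]
              push_cast
              ring_nf
            · simp [hfs]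

-- ===== VERDICT (by name: the statement is the Claim_ definition above) =====
theorem extend_to_natural_break_py_spec : Claim_equal_extend_to_natural_break_py := by
  intro text s _
  unfold Spec_extend_to_natural_break_py
  simp only [extend_to_natural_break_py, extend_to_natural_break_py_alt]
  rw [bLoop_eq]
  cases hA : pvALoop s (PySem.List.slice text.toList (some s) (some (s + 50))) 0 with
  | some r => simp
  | none =>
    rw [find_space_eq]
    cases hF : pvFirstSpace (PySem.List.slice text.toList (some s) (some (s + 50))) with
    | none => simp
    | some k => simp
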